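-- pv_equiv track=rewrite | github.com/V1B3hR/nethical | nethical/core/governance.py | _normalize_leetspeak
-- ===== SOURCE A (Python) =====
-- def _normalize_leetspeak(content: str) -> str:
--     """Convert leetspeak to normal text."""
--     replacements = {
--         '0': 'o', '1': 'i', '3': 'e', '4': 'a', '5': 's', '7': 't'
--     }
--     result = content
--     for leet, normal in replacements.items():
--         result = result.replace(leet, normal)
--     return result
-- ===== SOURCE B (Python) =====
-- def _normalize_leetspeak(content: str) -> str:
--     """Convert leetspeak to normal text."""
--     replacements = {
--         '0': 'o', '1': 'i', '3': 'e', '4': 'a', '5': 's', '7': 't'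
--     }
--     return ''.join(replacements.get(c, c) for c in content)
-- ===== Notes on version B (the rewrite author's own statement) =====
-- stated objective: alternative
-- what changed: Replaces six sequential full-string str.replace passes with a single per-character pass that maps each character through the dict (get with default) and joins once.
import Mathlib
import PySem

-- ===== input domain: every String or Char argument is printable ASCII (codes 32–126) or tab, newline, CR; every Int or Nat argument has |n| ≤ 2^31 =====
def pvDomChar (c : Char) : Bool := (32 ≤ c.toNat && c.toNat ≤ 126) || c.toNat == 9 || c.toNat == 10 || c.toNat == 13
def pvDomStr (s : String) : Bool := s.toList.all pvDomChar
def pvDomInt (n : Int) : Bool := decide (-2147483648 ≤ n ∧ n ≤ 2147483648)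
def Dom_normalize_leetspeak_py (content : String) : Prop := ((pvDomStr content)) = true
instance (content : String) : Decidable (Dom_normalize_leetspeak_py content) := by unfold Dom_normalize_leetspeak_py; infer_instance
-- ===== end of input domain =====

-- B replaces A's six sequential full-string replace passes with a single per-character dict-lookup-and-join pass.


-- ===== PORT A =====
-- the replacements dict, shared verbatim by A and B (insertion order kept)
def leetReplacements : PySem.Dict String String :=
  ((((((PySem.Dict.empty.insert "0" "o").insert "1" "i").insert "3" "e").insert "4" "a").insert "5" "s").insert "7" "t")

-- A: result = content; for leet, normal in replacements.items(): result = result.replace(leet, normal)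
def normalize_leetspeak_py (content : String) : String :=
  leetReplacements.items.foldl (fun result p => PySem.Str.replace result p.1 p.2) content

-- ===== PORT B =====
-- B: ''.join(replacements.get(c, c) for c in content)
def normalize_leetspeak_py_alt (content : String) : String :=
  PySem.Str.join "" (content.toList.map (fun c => leetReplacements.getD (String.singleton c) (String.singleton c)))

-- ===== PRECONDITION & SPEC =====
def Spec_normalize_leetspeak_py (content : String) (out : String) : Prop := out = normalize_leetspeak_py_alt content
instance (content : String) (out : String) : Decidable (Spec_normalize_leetspeak_py content out) := by unfold Spec_normalize_leetspeak_py; infer_instance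

-- ===== CLAIM (what is proved, stated in full; the proofs are below) =====
def Claim_equal_normalize_leetspeak_py : Prop := ∀ (content : String), Dom_normalize_leetspeak_py content → Spec_normalize_leetspeak_py content (normalize_leetspeak_py content)

-- ===== LEMMAS AND PROOFS =====
theorem leet_items : leetReplacements.items = [("0","o"),("1","i"),("3","e"),("4","a"),("5","s"),("7","t")] := by decide
theorem singleton_beq (a c : Char) : (String.singleton a == String.singleton c) = (a == c) := by
  by_cases h : a = c
  · subst h; simp
  · have : ¬ (String.singleton a = String.singleton c) := by
      simp [String.ext_iff, String.singleton, h]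
    simp [beq_eq_false_iff_ne.mpr this, beq_eq_false_iff_ne.mpr h]
theorem charLookup (c : Char) :
    (leetReplacements.getD (String.singleton c) (String.singleton c)).toList
      = [if '0' == c then 'o' else if '1' == c then 'i' else if '3' == c then 'e'
          else if '4' == c then 'a' else if '5' == c then 's' else if '7' == c then 't' else c] := by
  simp only [PySem.Dict.getD, PySem.Dict.get?, leet_items, List.find?_cons,
    show ("0" : String) = String.singleton '0' from rfl,
    show ("1" : String) = String.singleton '1' from rfl,
    show ("3" : String) = String.singleton '3' from rfl,
    show ("4" : String) = String.singleton '4' from rfl,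
    show ("5" : String) = String.singleton '5' from rfl,
    show ("7" : String) = String.singleton '7' from rfl,
    singleton_beq, List.find?_nil]
  split_ifs with h0 h1 h3 h4 h5 h7
  · obtain rfl := beq_iff_eq.mp h0; decide
  · obtain rfl := beq_iff_eq.mp h1; decide
  · obtain rfl := beq_iff_eq.mp h3; decide
  · obtain rfl := beq_iff_eq.mp h4; decide
  · obtain rfl := beq_iff_eq.mp h5; decide
  · obtain rfl := beq_iff_eq.mp h7; decide
  · simp only [Bool.not_eq_true] at h0 h1 h3 h4 h5 h7
    simp only [h0, h1, h3, h4, h5, h7, Option.map_none, Option.getD_none]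
    simp [String.singleton]
theorem replace_go_single (a b : Char) :
    ∀ (l : List Char) (fuel : Nat) (acc : List Char), l.length ≤ fuel →
      PySem.Chars.replace.go [a] [b] fuel l acc
        = acc.reverse ++ l.map (fun c => if a == c then b else c) := by
  intro l
  induction l with
  | nil =>
      intro fuel acc _
      cases fuel <;> simp [PySem.Chars.replace.go]
  | cons c t ih =>
      intro fuel acc h
      cases fuel with
      | zero => simp at h
      | succ n =>
          simp only [PySem.Chars.replace.go]
          by_cases hc : a = c
          · subst hc
            simp only [List.isPrefixOf, beq_self_eq_true, Bool.true_and, if_pos]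
            rw [show List.drop [a].length (a :: t) = t from rfl]
            rw [ih _ _ (by simpa using Nat.le_of_succ_le_succ h)]
            simp
          · have hp : List.isPrefixOf [a] (c :: t) = false := by
              simp [List.isPrefixOf, hc]
            rw [hp]
            simp only [Bool.false_eq_true, if_false]
            rw [ih _ _ (by simpa using Nat.le_of_succ_le_succ h)]
            simp [hc]

theorem replace_single (cs : List Char) (a b : Char) :
    PySem.Chars.replace cs [a] [b] = cs.map (fun c => if a == c then b else c) := by
  simp only [PySem.Chars.replace, List.isEmpty, Bool.false_eq_true, if_false]
  rw [replace_go_single a b cs cs.length [] (le_refl _)]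
  simp
-- the two ports agree on every string
theorem main_eq (content : String) : normalize_leetspeak_py content = normalize_leetspeak_py_alt content := by
  unfold normalize_leetspeak_py normalize_leetspeak_py_alt
  rw [← String.toList_inj]
  rw [PySem.Str.toList_join]
  rw [show List.map String.toList (List.map (fun c => leetReplacements.getD (String.singleton c) (String.singleton c)) content.toList)
      = List.map (fun c => [if '0' == c then 'o' else if '1' == c then 'i' else if '3' == c then 'e'
          else if '4' == c then 'a' else if '5' == c then 's' else if '7' == c then 't' else c]) content.toList from by
    rw [List.map_map]; exact List.map_congr_left (fun c _ => charLookup c)]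
  rw [show (List.map (fun c => [if '0' == c then 'o' else if '1' == c then 'i' else if '3' == c then 'e'
          else if '4' == c then 'a' else if '5' == c then 's' else if '7' == c then 't' else c]) content.toList)
      = List.map (fun x => [x]) (List.map (fun c => if '0' == c then 'o' else if '1' == c then 'i' else if '3' == c then 'e'
          else if '4' == c then 'a' else if '5' == c then 's' else if '7' == c then 't' else c) content.toList) from by
    rw [List.map_map]; rfl]
  rw [show ("" : String).toList = [] from rfl, PySem.Chars.join_nil_singletons]
  rw [leet_items]
  simp only [List.foldl]
  simp only [PySem.Str.toList_replace]
  rw [show ("0" : String).toList = ['0'] from rfl, show ("o" : String).toList = ['o'] from rfl,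
    show ("1" : String).toList = ['1'] from rfl, show ("i" : String).toList = ['i'] from rfl,
    show ("3" : String).toList = ['3'] from rfl, show ("e" : String).toList = ['e'] from rfl,
    show ("4" : String).toList = ['4'] from rfl, show ("a" : String).toList = ['a'] from rfl,
    show ("5" : String).toList = ['5'] from rfl, show ("s" : String).toList = ['s'] from rfl,
    show ("7" : String).toList = ['7'] from rfl, show ("t" : String).toList = ['t'] from rfl]
  simp only [replace_single, List.map_map]
  apply List.map_congr_left
  intro c _
  simp only [Function.comp_apply]
  by_cases e0 : ('0' : Char) = c
  · obtain rfl := e0; decide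
  by_cases e1 : ('1' : Char) = c
  · obtain rfl := e1; decide
  by_cases e3 : ('3' : Char) = c
  · obtain rfl := e3; decide
  by_cases e4 : ('4' : Char) = c
  · obtain rfl := e4; decide
  by_cases e5 : ('5' : Char) = c
  · obtain rfl := e5; decide
  by_cases e7 : ('7' : Char) = c
  · obtain rfl := e7; decide
  · have b0 : ('0' == c) = false := by simp [e0]
    have b1 : ('1' == c) = false := by simp [e1]
    have b3 : ('3' == c) = false := by simp [e3]
    have b4 : ('4' == c) = false := by simp [e4]
    have b5 : ('5' == c) = false := by simp [e5]
    have b7 : ('7' == c) = false := by simp [e7]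
    simp [b0, b1, b3, b4, b5, b7]

-- ===== VERDICT (by name: the statement is the Claim_ definition above) =====
theorem normalize_leetspeak_py_spec : Claim_equal_normalize_leetspeak_py := by
  intro content _
  unfold Spec_normalize_leetspeak_py
  exact main_eq content
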